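-- pv_equiv track=rewrite | github.com/incremen/pyfuncs_to_chars | core/anchors.py | build_n
-- ===== SOURCE A (Python) =====
-- BASE_ANCHORS = {
--     # ── Booleans → ints ──
--     0:   'int(not(not()))',                          # int(False)
--     1:   'int(not())',                               # int(True)
--
--     # ── len() on string reprs ──
--     2:   'len(str(ord(min(str(not())))))',            # len("84")
--     3:   'len(bin(int(not())))',                      # len("0b1")
--     4:   'len(str(not()))',                           # len("True")
--     5:   'len(bin(len(str(not()))))',                 # len("0b100")
--     6:   'sum(range(len(str(not()))))',               # sum(range(4))
--     11:  'len(str(frozenset()))',                     # len("frozenset()")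
--
--     # ── len() on type name strings ──
--     13:  'len(str(type(int())))',                     # "<class 'int'>"
--     14:  'len(str(type(not())))',                     # "<class 'bool'>"
--     15:  'len(str(type(float())))',                   # "<class 'float'>"
--     17:  'len(str(type(complex())))',                 # "<class 'complex'>"
--     18:  'len(str(type(property())))',                # "<class 'property'>"
--     19:  'len(str(type(frozenset())))',               # "<class 'frozenset'>"
--     20:  'len(str(type(memoryview(bytes()))))',       # "<class 'memoryview'>"
--     21:  'len(str(type(classmethod(int()))))',        # "<class 'classmethod'>"
--
--     # ── len() on iterator/reversed type name strings ──
--     22:  'len(str(type(iter(set()))))',               # "<class 'set_iterator'>"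
--     23:  'len(str(type(iter(list()))))',              # "<class 'list_iterator'>"
--     24:  'len(str(type(iter(bytes()))))',             # "<class 'bytes_iterator'>"
--     26:  'len(str(type(iter(dict()))))',              # "<class 'dict_keyiterator'>"
--     28:  'len(str(type(iter(str()))))',               # "<class 'str_ascii_iterator'>"
--     30:  'len(str(type(reversed(list()))))',          # "<class 'list_reverseiterator'>"
--     33:  'len(str(type(reversed(dict()))))',          # "<class 'dict_reversekeyiterator'>"
--
--     # ── ord(min/max(repr)) - pick chars from string reprs ──
--     32:  'ord(min(str(type(not()))))',                # ' ' in "<class 'bool'>"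
--     39:  'ord(min(str(bytes())))',                    # "'" in "b''"
--     40:  'ord(min(str(tuple())))',                    # '(' in "()"
--     41:  'ord(max(str(tuple())))',                    # ')' in "()"
--     46:  'ord(min(str(float())))',                    # '.' in "0.0"
--     48:  'ord(max(str(float())))',                    # '0' in "0.0"
--     70:  'ord(min(str(not(not()))))',                 # 'F' in "False"
--     84:  'ord(min(str(not())))',                      # 'T' in "True"
--     91:  'ord(min(str(list())))',                     # '[' in "[]"
--     93:  'ord(max(str(list())))',                     # ']' in "[]"
--     98:  'ord(max(str(bytes())))',                    # 'b' in "b''"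
--     106: 'ord(max(str(complex())))',                  # 'j' in "0j"
--     111: 'ord(max(oct(int(not()))))',                 # 'o' in "0o1"
--     115: 'ord(max(str(not(not()))))',                 # 's' in "False"
--     116: 'ord(max(str(set())))',                      # 't' in "set()"
--     117: 'ord(max(str(not())))',                      # 'u' in "True"
--     120: 'ord(max(hex(int(not()))))',                 # 'x' in "0x1"
--     121: 'ord(max(str(type(type(not())))))',          # 'y' in "<class 'type'>"
--     122: 'ord(max(str(frozenset())))',                # 'z' in "frozenset()"
--     123: 'ord(min(str(dict())))',                     # '{' in "{}"
--     125: 'ord(max(str(dict())))',                     # '}' in "{}"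
-- }
--
-- def decrement(expr, times):
--     """max(range(n)) = n - 1. Costs 2 parens per step."""
--     for _ in range(times):
--         expr = f'max(range({expr}))'
--     return expr
--
-- def triple(expr):
--     """len(str(list(bytes(n)))) = 3n exactly. Costs 4 parens."""
--     return f'len(str(list(bytes({expr}))))'
--
-- memo = {}
--
-- def build_n(n):
--     """Build an expression evaluating to n, using no numeric literals.
--
--     Strategy: build n in base 3 by interleaving 3x multiplications
--     with 0-2 decrements per level. Works for any non-negative integer.
--     """
--     if n in memo:
--         return memo[n]
--
--     # Use base anchor if it's an exact hit
--     if n in BASE_ANCHORS: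
--         memo[n] = BASE_ANCHORS[n]
--         return memo[n]
--
--     # Base-3 decomposition: n = 3 * (n // 3) + (n % 3)
--     # Build n//3 recursively, then apply 3x, then decrement by (n%3) if needed.
--     q = -(-n // 3)
--     r = 3 * q - n
--
--     result = decrement(triple(build_n(q)), r)
--     memo[n] = result
--     return result
-- ===== SOURCE B (Python) =====
-- # Anchor table stored as compact text rows: "<key> <expression>" each, parsed once.
-- ANCHOR_ROWS = (
--     "0 int(not(not()))",
--     "1 int(not())",
--     "2 len(str(ord(min(str(not())))))",
--     "3 len(bin(int(not())))",
--     "4 len(str(not()))",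
--     "5 len(bin(len(str(not()))))",
--     "6 sum(range(len(str(not()))))",
--     "11 len(str(frozenset()))",
--     "13 len(str(type(int())))",
--     "14 len(str(type(not())))",
--     "15 len(str(type(float())))",
--     "17 len(str(type(complex())))",
--     "18 len(str(type(property())))",
--     "19 len(str(type(frozenset())))",
--     "20 len(str(type(memoryview(bytes()))))",
--     "21 len(str(type(classmethod(int()))))",
--     "22 len(str(type(iter(set()))))",
--     "23 len(str(type(iter(list()))))",
--     "24 len(str(type(iter(bytes()))))",
--     "26 len(str(type(iter(dict()))))",
--     "28 len(str(type(iter(str()))))",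
--     "30 len(str(type(reversed(list()))))",
--     "33 len(str(type(reversed(dict()))))",
--     "32 ord(min(str(type(not()))))",
--     "39 ord(min(str(bytes())))",
--     "40 ord(min(str(tuple())))",
--     "41 ord(max(str(tuple())))",
--     "46 ord(min(str(float())))",
--     "48 ord(max(str(float())))",
--     "70 ord(min(str(not(not()))))",
--     "84 ord(min(str(not())))",
--     "91 ord(min(str(list())))",
--     "93 ord(max(str(list())))",
--     "98 ord(max(str(bytes())))",
--     "106 ord(max(str(complex())))",
--     "111 ord(max(oct(int(not()))))",
--     "115 ord(max(str(not(not()))))",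
--     "116 ord(max(str(set())))",
--     "117 ord(max(str(not())))",
--     "120 ord(max(hex(int(not()))))",
--     "121 ord(max(str(type(type(not())))))",
--     "122 ord(max(str(frozenset())))",
--     "123 ord(min(str(dict())))",
--     "125 ord(max(str(dict())))",
-- )
--
-- _TABLE = {}
-- for _row in ANCHOR_ROWS:
--     _k, _v = _row.split(' ', 1)
--     _TABLE[int(_k)] = _v
--
--
-- def build_n(n):
--     """Build an expression evaluating to n, using no numeric literals.
--
--     Iterative: walk down to an anchor collecting the base-3 remainder chain
--     on a stack, then unwind the stack, wrapping one tripling and r decrement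
--     layers around the anchor expression per level.
--     """
--     stack = []
--     cur = n
--     while cur not in _TABLE:
--         q = -(-cur // 3)
--         stack.append(3 * q - cur)
--         cur = q
--     expr = _TABLE[cur]
--     while stack:
--         r = stack.pop()
--         expr = 'len(str(list(bytes(' + expr + '))))'
--         for _ in range(r):
--             expr = 'max(range(' + expr + '))'
--     return expr
-- ===== Notes on version B (the rewrite author's own statement) =====
-- stated objective: alternative
-- what changed: Replaced A's top-down recursion with a global memo cache by an iterative two-phase algorithm: a descending loop that collects the base-3 remainder chain on a stack until it hits an anchor, then a stack-unwinding loop that wraps tripling and decrement expressions around the anchor; the anchor table is stored as compact text rows parsed once instead of a dict literal, and no memo is kept.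
import Mathlib
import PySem

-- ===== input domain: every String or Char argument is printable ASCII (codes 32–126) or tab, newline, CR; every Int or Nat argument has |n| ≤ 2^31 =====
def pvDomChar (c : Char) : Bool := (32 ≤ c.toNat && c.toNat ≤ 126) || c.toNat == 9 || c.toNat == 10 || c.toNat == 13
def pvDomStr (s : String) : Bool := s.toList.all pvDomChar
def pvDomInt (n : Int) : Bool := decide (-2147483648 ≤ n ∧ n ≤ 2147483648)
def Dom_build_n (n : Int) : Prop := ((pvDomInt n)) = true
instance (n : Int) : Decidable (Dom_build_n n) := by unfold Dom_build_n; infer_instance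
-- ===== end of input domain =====

-- B replaces A's top-down memoized recursion by an iterative remainder-stack
-- walk-down plus an unwind loop, reading the anchors from a compact text table
-- parsed once (objective: alternative decomposition). A's cross-call memo dict
-- only caches values it would recompute identically, so it is modelled
-- per-call here; the return value is unaffected.
set_option maxRecDepth 16384
set_option maxHeartbeats 8000000


-- ===== PORT A =====
def BASE_ANCHORS : PySem.Dict Int String := PySem.Dict.ofList [
  (0, "int(not(not()))"),
  (1, "int(not())"),
  (2, "len(str(ord(min(str(not())))))"),
  (3, "len(bin(int(not())))"),
  (4, "len(str(not()))"),
  (5, "len(bin(len(str(not()))))"),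
  (6, "sum(range(len(str(not()))))"),
  (11, "len(str(frozenset()))"),
  (13, "len(str(type(int())))"),
  (14, "len(str(type(not())))"),
  (15, "len(str(type(float())))"),
  (17, "len(str(type(complex())))"),
  (18, "len(str(type(property())))"),
  (19, "len(str(type(frozenset())))"),
  (20, "len(str(type(memoryview(bytes()))))"),
  (21, "len(str(type(classmethod(int()))))"),
  (22, "len(str(type(iter(set()))))"),
  (23, "len(str(type(iter(list()))))"),
  (24, "len(str(type(iter(bytes()))))"),
  (26, "len(str(type(iter(dict()))))"),
  (28, "len(str(type(iter(str()))))"),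
  (30, "len(str(type(reversed(list()))))"),
  (33, "len(str(type(reversed(dict()))))"),
  (32, "ord(min(str(type(not()))))"),
  (39, "ord(min(str(bytes())))"),
  (40, "ord(min(str(tuple())))"),
  (41, "ord(max(str(tuple())))"),
  (46, "ord(min(str(float())))"),
  (48, "ord(max(str(float())))"),
  (70, "ord(min(str(not(not()))))"),
  (84, "ord(min(str(not())))"),
  (91, "ord(min(str(list())))"),
  (93, "ord(max(str(list())))"),
  (98, "ord(max(str(bytes())))"),
  (106, "ord(max(str(complex())))"),
  (111, "ord(max(oct(int(not()))))"),
  (115, "ord(max(str(not(not()))))"),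
  (116, "ord(max(str(set())))"),
  (117, "ord(max(str(not())))"),
  (120, "ord(max(hex(int(not()))))"),
  (121, "ord(max(str(type(type(not())))))"),
  (122, "ord(max(str(frozenset())))"),
  (123, "ord(min(str(dict())))"),
  (125, "ord(max(str(dict())))")]

-- decrement(expr, times): for _ in range(times): expr = f'max(range({expr}))'
def decrement (expr : String) (times : Int) : String :=
  (PySem.List.pyRange 0 times 1).foldl (fun e _ => "max(range(" ++ e ++ "))") expr

-- triple(expr)
def triple (expr : String) : String := "len(str(list(bytes(" ++ expr ++ "))))"

-- the recursion argument (n, then the successive ceiling quotients q) shrinks in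
-- absolute value as long as it misses the anchor table (which holds 0 and 1)
theorem pvCeilAbsLt (n : Int) (h : BASE_ANCHORS.get? n = none) :
    (-(PySem.Int.floordiv (-n) 3)).natAbs < n.natAbs := by
  have h0 : n ≠ 0 := by
    rintro rfl
    exact (by decide : BASE_ANCHORS.get? (0:Int) ≠ none) h
  have h1 : n ≠ 1 := by
    rintro rfl
    exact (by decide : BASE_ANCHORS.get? (1:Int) ≠ none) h
  rw [PySem.Int.floordiv_eq_ediv_of_pos (by omega)]
  omega

-- build_n with the global memo dict threaded explicitly (each Lean call starts
-- from the empty memo; the cache never changes the returned string)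
def buildGo (n : Int) (memo : PySem.Dict Int String) : String × PySem.Dict Int String :=
  match memo.get? n with
  | some e => (e, memo)
  | none =>
    match h : BASE_ANCHORS.get? n with
    | some e => (e, memo.insert n e)
    | none =>
      let q := -(PySem.Int.floordiv (-n) 3)
      let r := 3 * q - n
      let (sub, m1) := buildGo q memo
      let result := decrement (triple sub) r
      (result, m1.insert n result)
termination_by n.natAbs
decreasing_by exact pvCeilAbsLt n h

def build_n (n : Int) : String := (buildGo n PySem.Dict.empty).1

-- ===== PORT B =====
-- the anchor table of Source B: compact text rows, "<key> <expression>" each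
def ANCHOR_ROWS : List String := [
  "0 int(not(not()))",
  "1 int(not())",
  "2 len(str(ord(min(str(not())))))",
  "3 len(bin(int(not())))",
  "4 len(str(not()))",
  "5 len(bin(len(str(not()))))",
  "6 sum(range(len(str(not()))))",
  "11 len(str(frozenset()))",
  "13 len(str(type(int())))",
  "14 len(str(type(not())))",
  "15 len(str(type(float())))",
  "17 len(str(type(complex())))",
  "18 len(str(type(property())))",
  "19 len(str(type(frozenset())))",
  "20 len(str(type(memoryview(bytes()))))",
  "21 len(str(type(classmethod(int()))))",
  "22 len(str(type(iter(set()))))",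
  "23 len(str(type(iter(list()))))",
  "24 len(str(type(iter(bytes()))))",
  "26 len(str(type(iter(dict()))))",
  "28 len(str(type(iter(str()))))",
  "30 len(str(type(reversed(list()))))",
  "33 len(str(type(reversed(dict()))))",
  "32 ord(min(str(type(not()))))",
  "39 ord(min(str(bytes())))",
  "40 ord(min(str(tuple())))",
  "41 ord(max(str(tuple())))",
  "46 ord(min(str(float())))",
  "48 ord(max(str(float())))",
  "70 ord(min(str(not(not()))))",
  "84 ord(min(str(not())))",
  "91 ord(min(str(list())))",
  "93 ord(max(str(list())))",
  "98 ord(max(str(bytes())))",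
  "106 ord(max(str(complex())))",
  "111 ord(max(oct(int(not()))))",
  "115 ord(max(str(not(not()))))",
  "116 ord(max(str(set())))",
  "117 ord(max(str(not())))",
  "120 ord(max(hex(int(not()))))",
  "121 ord(max(str(type(type(not())))))",
  "122 ord(max(str(frozenset())))",
  "123 ord(min(str(dict())))",
  "125 ord(max(str(dict())))"]

-- the module-level parsing loop of Source B: _k, _v = _row.split(' ', 1); _TABLE[int(_k)] = _v
-- (split/int cannot fail on the well-formed constant rows; the impossible shapes keep d)
def pvParseRow (d : PySem.Dict Int String) (row : String) : PySem.Dict Int String :=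
  match PySem.Str.splitMax? row " " 1 with
  | some (k :: v :: []) =>
    (match PySem.Int.ofStr? k with
     | some ki => d.insert ki v
     | none => d)
  | _ => d

def pvTable : PySem.Dict Int String := ANCHOR_ROWS.foldl pvParseRow PySem.Dict.empty

-- the loop variable shrinks in absolute value while it misses the parsed
-- table (which holds keys 0 and 1); needed for the walk-down loop's termination
theorem pvShrink (cur : Int) (h : pvTable.get? cur = none) :
    (-(PySem.Int.floordiv (-cur) 3)).natAbs < cur.natAbs := by
  have h0 : cur ≠ 0 := by
    rintro rfl
    exact (by decide : pvTable.get? (0:Int) ≠ none) h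
  have h1 : cur ≠ 1 := by
    rintro rfl
    exact (by decide : pvTable.get? (1:Int) ≠ none) h
  rw [PySem.Int.floordiv_eq_ediv_of_pos (by omega)]
  omega

-- walk-down loop of Source B: while cur not in _TABLE: push 3*q-cur; cur = q
-- (the stack's head is the most recently pushed remainder, i.e. the pop side)
def chainDown (cur : Int) (stack : List Int) : String × List Int :=
  match h : pvTable.get? cur with
  | some e => (e, stack)
  | none =>
    let q := -(PySem.Int.floordiv (-cur) 3)
    chainDown q ((3 * q - cur) :: stack)
termination_by cur.natAbs
decreasing_by exact pvShrink cur h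

-- inner loop: for _ in range(r): expr = 'max(range(' + expr + '))'  (r.toNat turns)
def wrapDecN (e : String) : Nat → String
  | 0 => e
  | k + 1 => wrapDecN ("max(range(" ++ e ++ "))") k

-- unwind loop: while stack: pop r; triple-wrap then r decrement wraps
def unwindAll (expr : String) : List Int → String
  | [] => expr
  | r :: rest => unwindAll (wrapDecN ("len(str(list(bytes(" ++ expr ++ "))))") r.toNat) rest

def build_n_alt (n : Int) : String :=
  let p := chainDown n []
  unwindAll p.1 p.2

-- ===== PRECONDITION & SPEC =====
def Spec_build_n (n : Int) (out : String) : Prop := out = build_n_alt n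
instance (n : Int) (out : String) : Decidable (Spec_build_n n out) := by unfold Spec_build_n; infer_instance

-- ===== CLAIM (what is proved, stated in full; the proofs are below) =====
def Claim_equal_build_n : Prop := ∀ (n : Int), Dom_build_n n → Spec_build_n n (build_n n)

-- ===== LEMMAS AND PROOFS =====

-- the parsed table is exactly A's anchor dict
theorem pvTableEq : pvTable = BASE_ANCHORS := by decide

theorem wrapDecN_eq (k : Nat) (e : String) :
    wrapDecN e k = (fun s => "max(range(" ++ s ++ "))")^[k] e := by
  induction k generalizing e with
  | zero => rfl
  | succ k ih => rw [wrapDecN, ih, Function.iterate_succ_apply]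

theorem foldl_const_iterate (g : String → String) (l : List Int) (e : String) :
    l.foldl (fun x _ => g x) e = g^[l.length] e := by
  induction l generalizing e with
  | nil => rfl
  | cons r rest ih => rw [List.foldl_cons, ih, List.length_cons, Function.iterate_succ_apply]

theorem length_pyRange_one (r : Int) : (PySem.List.pyRange 0 r 1).length = r.toNat := by
  simp only [PySem.List.pyRange]
  split_ifs with h1 h2 h3 <;> simp_all <;> omega

theorem wrapDec_eq_decrement (e : String) (r : Int) :
    wrapDecN e r.toNat = decrement e r := by
  rw [wrapDecN_eq, decrement, foldl_const_iterate, length_pyRange_one]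

theorem unwindAll_foldl (stack : List Int) (e : String) :
    unwindAll e stack = stack.foldl (fun x r => decrement (triple x) r) e := by
  induction stack generalizing e with
  | nil => rfl
  | cons r rest ih => rw [unwindAll, List.foldl_cons, ih, wrapDec_eq_decrement]; rfl

theorem buildGo_empty_eq (n : Int) :
    (buildGo n PySem.Dict.empty).1 =
      match BASE_ANCHORS.get? n with
      | some e => e
      | none =>
        let q := -(PySem.Int.floordiv (-n) 3)
        decrement (triple ((buildGo q PySem.Dict.empty).1)) (3 * q - n) := by
  rw [buildGo]
  have hm : (PySem.Dict.empty : PySem.Dict Int String).get? n = none := PySem.Dict.get?_empty n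
  rw [hm]
  cases h : BASE_ANCHORS.get? n with
  | some e => simp
  | none => simp

theorem chainDown_unwind (cur : Int) (stack : List Int) :
    unwindAll (chainDown cur stack).1 (chainDown cur stack).2 =
      stack.foldl (fun x r => decrement (triple x) r) ((buildGo cur PySem.Dict.empty).1) := by
  rw [chainDown, buildGo_empty_eq]
  cases h : pvTable.get? cur with
  | some e =>
    have hA : BASE_ANCHORS.get? cur = some e := pvTableEq ▸ h
    rw [hA]
    exact unwindAll_foldl stack e
  | none =>
    have hA : BASE_ANCHORS.get? cur = none := pvTableEq ▸ h
    rw [hA]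
    simp only
    rw [chainDown_unwind (-(PySem.Int.floordiv (-cur) 3))
        ((3 * (-(PySem.Int.floordiv (-cur) 3)) - cur) :: stack),
      List.foldl_cons]
termination_by cur.natAbs
decreasing_by exact pvShrink cur h

-- ===== VERDICT (by name: the statement is the Claim_ definition above) =====
theorem build_n_spec : Claim_equal_build_n := by
  intro n _
  unfold Spec_build_n build_n build_n_alt
  have := chainDown_unwind n []
  simp only [List.foldl] at this
  exact this.symm
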